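-- pv_equiv track=rewrite | github.com/djankovik/PR-Project---Experimental-HAR | src/utils.py | get_sensor_measurements_sliding_windows
-- ===== SOURCE A (Python) =====
-- def get_sensor_measurements_sliding_windows(measurements_sensor_vector,window_size = 50,window_step = 10,include_trans_activity = False,window_activity_label = 'dominant'):
--     windows = []
--     for i in range(0,len(measurements_sensor_vector[0])-window_size+1,window_step):
--         window = []
--         for measurement in measurements_sensor_vector:
--             window.append(measurement[i:i+window_size])
--         windows.append(window)
--
--     return windows
-- ===== SOURCE B (Python) =====
-- def get_sensor_measurements_sliding_windows(measurements_sensor_vector, window_size=50, window_step=10, include_trans_activity=False, window_activity_label='dominant'):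
--     indices = range(0, len(measurements_sensor_vector[0]) - window_size + 1, window_step)
--     per_sensor = [[sensor[i:i + window_size] for i in indices]
--                   for sensor in measurements_sensor_vector]
--     return [list(t) for t in zip(*per_sensor)]
-- ===== Notes on version B (the rewrite author's own statement) =====
-- stated objective: alternative
-- what changed: B builds the slices sensor-major (one list of slices per sensor over a precomputed index range) and then transposes with zip(*...) to get the window-major output, instead of A's window-major nested loops; Pre_ excludes only inputs where A raises (empty sensor list -> IndexError, step 0 -> ValueError).
import Mathlib
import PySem

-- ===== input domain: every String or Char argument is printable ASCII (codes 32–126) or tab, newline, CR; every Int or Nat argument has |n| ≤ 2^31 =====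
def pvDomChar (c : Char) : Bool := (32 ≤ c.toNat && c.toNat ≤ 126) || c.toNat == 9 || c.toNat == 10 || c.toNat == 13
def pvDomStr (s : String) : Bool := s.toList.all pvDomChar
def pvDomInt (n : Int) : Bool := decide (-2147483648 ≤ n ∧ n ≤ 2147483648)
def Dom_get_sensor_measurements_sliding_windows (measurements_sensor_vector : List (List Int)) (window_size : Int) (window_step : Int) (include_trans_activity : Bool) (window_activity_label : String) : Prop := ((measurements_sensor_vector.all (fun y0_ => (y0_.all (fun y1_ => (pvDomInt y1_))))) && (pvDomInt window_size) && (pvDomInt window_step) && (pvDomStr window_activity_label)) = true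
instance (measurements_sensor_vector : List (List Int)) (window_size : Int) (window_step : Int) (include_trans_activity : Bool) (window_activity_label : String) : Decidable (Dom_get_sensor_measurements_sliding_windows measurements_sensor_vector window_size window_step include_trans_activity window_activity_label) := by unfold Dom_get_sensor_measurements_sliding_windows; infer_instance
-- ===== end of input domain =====

-- B computes the windows sensor-major and transposes (zip(*...)), instead of A's window-major
-- nested loops; same asymptotic cost (objective: alternative decomposition).

-- ===== PORT A =====
-- A: for i in range(0, len(msv[0]) - ws + 1, step): window = [m[i:i+ws] for m in msv] (via appends)
def get_sensor_measurements_sliding_windows (measurements_sensor_vector : List (List Int)) (window_size : Int) (window_step : Int) (include_trans_activity : Bool) (window_activity_label : String) : List (List (List Int)) :=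
  (PySem.List.pyRange 0 (((PySem.List.pyGet? measurements_sensor_vector 0).getD []).length - window_size + 1) window_step).foldl
    (fun windows i =>
      windows ++ [measurements_sensor_vector.foldl
        (fun window measurement => window ++ [PySem.List.slice measurement (some i) (some (i + window_size))]) []])
    []

-- ===== PORT B =====
-- hand port of Python's zip(*lists) on lists of List Int, followed by list(t):
-- truncates at the shortest list; zip() of no lists is empty. Exact for this usage.
def pvZipStarGo : Nat → List (List (List Int)) → List (List (List Int))
  | 0, _ => []
  | n+1, ls =>
    if ls.all (fun l => !l.isEmpty) then
      (ls.map (fun l => l.headD [])) :: pvZipStarGo n (ls.map List.tail)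
    else []

def pvZipStar (ls : List (List (List Int))) : List (List (List Int)) :=
  match ls with
  | [] => []
  | first :: _ => pvZipStarGo first.length ls

def get_sensor_measurements_sliding_windows_alt (measurements_sensor_vector : List (List Int)) (window_size : Int) (window_step : Int) (include_trans_activity : Bool) (window_activity_label : String) : List (List (List Int)) :=
  let indices := PySem.List.pyRange 0 (((PySem.List.pyGet? measurements_sensor_vector 0).getD []).length - window_size + 1) window_step
  let per_sensor := measurements_sensor_vector.map
    (fun sensor => indices.map (fun i => PySem.List.slice sensor (some i) (some (i + window_size))))
  pvZipStar per_sensor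

-- ===== PRECONDITION & SPEC =====
-- A raises IndexError on an empty sensor list ([][0]) and ValueError when window_step = 0; Pre_
-- excludes exactly those inputs.
def Pre_get_sensor_measurements_sliding_windows (measurements_sensor_vector : List (List Int)) (window_size : Int) (window_step : Int) (include_trans_activity : Bool) (window_activity_label : String) : Prop :=
  measurements_sensor_vector ≠ [] ∧ window_step ≠ 0
instance (measurements_sensor_vector : List (List Int)) (window_size : Int) (window_step : Int) (include_trans_activity : Bool) (window_activity_label : String) : Decidable (Pre_get_sensor_measurements_sliding_windows measurements_sensor_vector window_size window_step include_trans_activity window_activity_label) := by unfold Pre_get_sensor_measurements_sliding_windows; infer_instance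

def pvWitness_get_sensor_measurements_sliding_windows : List (List Int) × Int × Int × Bool × String :=
  ([[1, 2, 3, 4], [5, 6, 7, 8]], 2, 1, false, "dominant")

def Spec_get_sensor_measurements_sliding_windows (measurements_sensor_vector : List (List Int)) (window_size : Int) (window_step : Int) (include_trans_activity : Bool) (window_activity_label : String) (out : List (List (List Int))) : Prop := out = get_sensor_measurements_sliding_windows_alt measurements_sensor_vector window_size window_step include_trans_activity window_activity_label
instance (measurements_sensor_vector : List (List Int)) (window_size : Int) (window_step : Int) (include_trans_activity : Bool) (window_activity_label : String) (out : List (List (List Int))) : Decidable (Spec_get_sensor_measurements_sliding_windows measurements_sensor_vector window_size window_step include_trans_activity window_activity_label out) := by unfold Spec_get_sensor_measurements_sliding_windows; infer_instance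

-- ===== CLAIM =====
def Claim_equal_get_sensor_measurements_sliding_windows : Prop := ∀ (measurements_sensor_vector : List (List Int)) (window_size : Int) (window_step : Int) (include_trans_activity : Bool) (window_activity_label : String), Dom_get_sensor_measurements_sliding_windows measurements_sensor_vector window_size window_step include_trans_activity window_activity_label → Pre_get_sensor_measurements_sliding_windows measurements_sensor_vector window_size window_step include_trans_activity window_activity_label → Spec_get_sensor_measurements_sliding_windows measurements_sensor_vector window_size window_step include_trans_activity window_activity_label (get_sensor_measurements_sliding_windows measurements_sensor_vector window_size window_step include_trans_activity window_activity_label)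

-- ===== LEMMAS AND PROOFS =====

-- foldl with snoc is map
theorem pv_foldl_snoc {α β : Type} (f : α → β) (l : List α) (init : List β) :
    l.foldl (fun acc x => acc ++ [f x]) init = init ++ l.map f := by
  induction l generalizing init with
  | nil => simp
  | cons x xs ih => simp [List.foldl, ih]

-- transpose lemma: zip(*) of sensor-major rows is the window-major list
theorem pv_zipStarGo_map {α : Type} (l : List α) (msv : List (List Int)) (g : List Int → α → List Int) :
    pvZipStarGo l.length (msv.map (fun s => l.map (g s))) =
      l.map (fun i => msv.map (fun s => g s i)) := by
  induction l with
  | nil => simp [pvZipStarGo]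
  | cons i l' ih =>
    simp only [List.map_cons, List.length_cons, pvZipStarGo]
    rw [if_pos (by simp)]
    simp only [List.map_map, Function.comp_def, List.headD_cons, List.tail_cons]
    rw [ih]

-- pvZipStar on a nonempty sensor-major list is the window-major transpose
theorem pv_zipStar_map {α : Type} (l : List α) (s0 : List Int) (rest : List (List Int))
    (g : List Int → α → List Int) :
    pvZipStar ((s0 :: rest).map (fun s => l.map (g s))) =
      l.map (fun i => (s0 :: rest).map (fun s => g s i)) := by
  have h := pv_zipStarGo_map l (s0 :: rest) g
  simpa [pvZipStar] using h

theorem get_sensor_measurements_sliding_windows_eq (msv : List (List Int)) (ws st : Int)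
    (b : Bool) (lbl : String) (hne : msv ≠ []) :
    get_sensor_measurements_sliding_windows msv ws st b lbl =
      get_sensor_measurements_sliding_windows_alt msv ws st b lbl := by
  unfold get_sensor_measurements_sliding_windows get_sensor_measurements_sliding_windows_alt
  cases msv with
  | nil => exact absurd rfl hne
  | cons s0 rest =>
    set idx := PySem.List.pyRange 0
      (((PySem.List.pyGet? (s0 :: rest) 0).getD []).length - ws + 1) st with hidx
    show idx.foldl _ [] = pvZipStar _
    have hA : idx.foldl
        (fun windows i => windows ++ [(s0 :: rest).foldl
          (fun window m => window ++ [PySem.List.slice m (some i) (some (i + ws))]) []]) [] =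
        idx.map (fun i => (s0 :: rest).map (fun m => PySem.List.slice m (some i) (some (i + ws)))) := by
      rw [pv_foldl_snoc (fun i => (s0 :: rest).foldl
        (fun window m => window ++ [PySem.List.slice m (some i) (some (i + ws))]) []) idx []]
      simp only [List.nil_append]
      apply List.map_congr_left
      intro i _
      rw [pv_foldl_snoc (fun m => PySem.List.slice m (some i) (some (i + ws))) (s0 :: rest) []]
      simp
    rw [hA, pv_zipStar_map idx s0 rest (fun s i => PySem.List.slice s (some i) (some (i + ws)))]

-- ===== VERDICT =====
theorem get_sensor_measurements_sliding_windows_spec : Claim_equal_get_sensor_measurements_sliding_windows := by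
  intro msv ws st b lbl _ hpre
  exact get_sensor_measurements_sliding_windows_eq msv ws st b lbl hpre.1
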